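-- pv_equiv track=rewrite | github.com/Kamilet/learning-coding | simple-program/check-io-solutions/min-max.py | bubble_max
-- ===== SOURCE A (Python) =====
-- def bubble_max(lists, switch = False):
--     '''Bubble Sort. Standard.
--     I choice it because wanted to get the position of the max one or the min one.
--     I thought return the position could be better when expand it... may be not.
--     Set to False to get the position of smallest one.'''
--     _count = len(lists)
--     if switch:
--         _position_min = 0
--         k = 0
--         for i in range(0, _count):
--             if i < k:
--                 continue
--             for k in range(i+1, _count):
--                 if lists[i] > lists[k]:
--                     _position_min = k
--                     i = k
--                     break
--         return _position_min
--     else: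
--         _position_max = 0
--         k = 0
--         for i in range(0, _count):
--            if i < k:
--                continue
--            for k in range(i+1, _count):
--                if lists[i] < lists[k]:
--                    _position_max = k
--                    i = k
--                    break
--         return _position_max
-- ===== SOURCE B (Python) =====
-- def bubble_max(lists, switch = False):
--     extreme = min(lists) if switch else max(lists)
--     return lists.index(extreme)
-- ===== Notes on version B (the rewrite author's own statement) =====
-- stated objective: simpler
-- what changed: Replaces A's candidate-chasing nested index loops with two value-level passes (compute the extreme with max()/min(), then locate its first position with list.index(), both C-level builtins); Pre_ excludes the empty list, where A's 0 is a leftover of the initial variable and B naturally raises ValueError.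
-- outside the precondition, e.g. on bubble_max([], False): A returns 0, B raises ValueError
import Mathlib
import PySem

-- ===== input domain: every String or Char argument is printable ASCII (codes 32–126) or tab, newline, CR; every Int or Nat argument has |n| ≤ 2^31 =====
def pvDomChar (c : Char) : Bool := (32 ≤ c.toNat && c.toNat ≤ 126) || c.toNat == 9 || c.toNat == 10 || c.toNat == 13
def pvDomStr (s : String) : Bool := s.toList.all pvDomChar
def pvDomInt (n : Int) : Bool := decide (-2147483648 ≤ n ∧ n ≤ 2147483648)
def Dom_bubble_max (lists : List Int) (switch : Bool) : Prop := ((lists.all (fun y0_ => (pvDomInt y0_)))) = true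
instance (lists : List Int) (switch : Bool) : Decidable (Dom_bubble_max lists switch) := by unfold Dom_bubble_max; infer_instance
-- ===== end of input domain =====

-- B computes the extreme value first (max/min) and then locates its first index
-- with list.index, replacing A's candidate-chasing nested index loops (objective: simpler).


-- ===== PORT A =====
-- A's two branches run the same nested loop, differing only in the comparison
-- (`>` for switch=True, `<` for switch=False); the loop body is factored over `cmp`.
-- All indices come from `range`, hence are in range, so `(pyGet? …).getD 0` is exact.
-- Inner `for k in range(i+1, n)`: returns (final value of k, some break-index or none).
def bmInner (a : List Int) (cmp : Int → Int → Bool) (x : Int) : List Int → Int → Int × Option Int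
  | [], k => (k, none)
  | j :: rest, _ =>
    if cmp x ((PySem.List.pyGet? a j).getD 0) then (j, some j)
    else bmInner a cmp x rest j

-- Outer `for i in range(0, n)` with the `if i < k: continue` skip; state = (_position, k).
def bmOuter (a : List Int) (cmp : Int → Int → Bool) (n : Int) : List Int → Int × Int → Int × Int
  | [], st => st
  | i :: rest, (pos, k) =>
    if i < k then bmOuter a cmp n rest (pos, k)
    else
      match bmInner a cmp ((PySem.List.pyGet? a i).getD 0) (PySem.List.pyRange (i+1) n 1) k with
      | (k', some j) => bmOuter a cmp n rest (j, k')
      | (k', none) => bmOuter a cmp n rest (pos, k')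

def bubble_max (lists : List Int) (switch : Bool) : Int :=
  let n : Int := lists.length
  if switch then
    (bmOuter lists (fun x y => decide (x > y)) n (PySem.List.pyRange 0 n 1) (0, 0)).1
  else
    (bmOuter lists (fun x y => decide (x < y)) n (PySem.List.pyRange 0 n 1) (0, 0)).1

-- ===== PORT B =====
-- Source B: extreme = min(lists) if switch else max(lists); return lists.index(extreme)
def bubble_max_alt (lists : List Int) (switch : Bool) : Int :=
  match (if switch then PySem.List.min? lists (fun v => v) else PySem.List.max? lists (fun v => v)) with
  | some v => ((PySem.List.index? lists v).getD 0 : Nat)  -- v ∈ lists, so index always found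
  | none => 0  -- empty list: Python raises ValueError here (outside Pre_)

-- ===== PRECONDITION & SPEC =====
-- Pre_ excludes the empty list, on which A returns the accidental 0 of its
-- never-updated initial variable while B's Python raises ValueError from max()/min().
def Pre_bubble_max (lists : List Int) (switch : Bool) : Prop := lists ≠ []
instance (lists : List Int) (switch : Bool) : Decidable (Pre_bubble_max lists switch) := by unfold Pre_bubble_max; infer_instance
def pvWitness_bubble_max : List Int × Bool := ([1, 3, 2], false)

def Spec_bubble_max (lists : List Int) (switch : Bool) (out : Int) : Prop := out = bubble_max_alt lists switch
instance (lists : List Int) (switch : Bool) (out : Int) : Decidable (Spec_bubble_max lists switch out) := by unfold Spec_bubble_max; infer_instance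

-- ===== CLAIM (what is proved, stated in full; the proofs are below) =====
def Claim_equal_bubble_max : Prop := ∀ (lists : List Int) (switch : Bool), Dom_bubble_max lists switch → Pre_bubble_max lists switch → Spec_bubble_max lists switch (bubble_max lists switch)

-- ===== LEMMAS AND PROOFS =====

-- bridge: the element A reads at a cast index
lemma bm_read (a : List Int) (s : Nat) :
    (PySem.List.pyGet? a (s : Int)).getD 0 = a.getD s 0 := by
  simp [PySem.List.pyGet?_natCast, List.getD_eq_getElem?_getD]

-- inner loop: first hit at j (minimal over [s, j)) breaks with k = j
lemma inner_found (a : List Int) (cmp : Int → Int → Bool) (x : Int) :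
    ∀ (s : Nat) (k0 : Int), ∀ j : Nat, s ≤ j → j < a.length →
      cmp x (a.getD j 0) = true →
      (∀ m, s ≤ m → m < j → cmp x (a.getD m 0) = false) →
      bmInner a cmp x (PySem.List.pyRange (s : Int) (a.length : Int) 1) k0
        = ((j : Int), some (j : Int)) := by
  intro s k0 j hsj hj hhit hmin
  induction hfuel : j - s generalizing s k0 with
  | zero =>
    have hsj' : s = j := by omega
    subst hsj'
    rw [PySem.List.pyRange_one_cons (by exact_mod_cast hj)]
    simp only [bmInner, bm_read, hhit]
    simp
  | succ f ih =>
    have hs : s < j := by omega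
    rw [PySem.List.pyRange_one_cons (by exact_mod_cast (by omega : s < a.length))]
    have hmiss : cmp x (a.getD s 0) = false := hmin s le_rfl hs
    simp only [bmInner, bm_read, hmiss, Bool.false_eq_true, if_false]
    have hcast : (s : Int) + 1 = ((s + 1 : Nat) : Int) := by push_cast; ring
    rw [hcast]
    exact ih (s + 1) (s : Int) (by omega) (fun m hm hmj => hmin m (by omega) hmj) (by omega)

-- inner loop: no hit in [s, len) — no break, k ends at len-1 (or untouched if range empty)
lemma inner_none (a : List Int) (cmp : Int → Int → Bool) (x : Int) :
    ∀ (s : Nat) (k0 : Int),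
      (∀ m, s ≤ m → m < a.length → cmp x (a.getD m 0) = false) →
      bmInner a cmp x (PySem.List.pyRange (s : Int) (a.length : Int) 1) k0
        = (if s < a.length then ((a.length : Int) - 1) else k0, none) := by
  intro s k0 hmiss
  induction hfuel : a.length - s generalizing s k0 with
  | zero =>
    have hs : a.length ≤ s := by omega
    rw [PySem.List.pyRange_one_eq_nil (by exact_mod_cast hs)]
    simp [bmInner, if_neg (by omega : ¬ s < a.length)]
  | succ f ih =>
    have hs : s < a.length := by omega
    rw [PySem.List.pyRange_one_cons (by exact_mod_cast hs)]
    simp only [bmInner, bm_read, hmiss s le_rfl hs, Bool.false_eq_true, if_false]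
    have hcast : (s : Int) + 1 = ((s + 1 : Nat) : Int) := by push_cast; ring
    rw [hcast, ih (s + 1) (s : Int) (fun m hm hml => hmiss m (by omega) hml) (by omega)]
    by_cases h1 : s + 1 < a.length
    · simp [h1, hs]
    · have : s = a.length - 1 := by omega
      simp [if_neg h1, hs]
      omega

-- outer loop skips every i < k
lemma outer_skip (a : List Int) (cmp : Int → Int → Bool) :
    ∀ (s t : Nat) (pos : Int), s ≤ t → t ≤ a.length →
      bmOuter a cmp (a.length : Int) (PySem.List.pyRange (s : Int) (a.length : Int) 1) (pos, (t : Int))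
        = bmOuter a cmp (a.length : Int) (PySem.List.pyRange (t : Int) (a.length : Int) 1) (pos, (t : Int)) := by
  intro s t pos hst htl
  induction hfuel : t - s generalizing s with
  | zero =>
    have : s = t := by omega
    subst this; rfl
  | succ f ih =>
    have hs : s < t := by omega
    rw [PySem.List.pyRange_one_cons (by exact_mod_cast (by omega : s < a.length))]
    simp only [bmOuter, if_pos (by exact_mod_cast hs : (s : Int) < (t : Int))]
    have hcast : (s : Int) + 1 = ((s + 1 : Nat) : Int) := by push_cast; ring
    rw [hcast]
    exact ih (s + 1) (by omega) (by omega)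

-- once k = len-1 and no further hit is possible at len-1 (empty inner range), nothing changes
lemma outer_tail (a : List Int) (cmp : Int → Int → Bool) :
    ∀ (s : Nat) (pos : Int), s ≤ a.length → 1 ≤ a.length →
      bmOuter a cmp (a.length : Int) (PySem.List.pyRange (s : Int) (a.length : Int) 1) (pos, (a.length : Int) - 1)
        = (pos, (a.length : Int) - 1) := by
  intro s pos hsl hl
  induction hfuel : a.length - s generalizing s with
  | zero =>
    have : s = a.length := by omega
    subst this
    rw [PySem.List.pyRange_one_eq_nil le_rfl]
    rfl
  | succ f ih =>
    have hs : s < a.length := by omega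
    rw [PySem.List.pyRange_one_cons (by exact_mod_cast hs)]
    by_cases hlast : s + 1 < a.length
    · simp only [bmOuter, if_pos (by push_cast; omega : (s : Int) < (a.length : Int) - 1)]
      have hcast : (s : Int) + 1 = ((s + 1 : Nat) : Int) := by push_cast; ring
      rw [hcast]
      exact ih (s + 1) (by omega) (by omega)
    · -- s = len - 1: processed, but the inner range is empty
      have hse : (s : Int) = (a.length : Int) - 1 := by push_cast; omega
      simp only [bmOuter, if_neg (by omega : ¬ ((s : Int) < (a.length : Int) - 1))]
      rw [PySem.List.pyRange_one_eq_nil (by push_cast; omega)]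
      simp [bmInner, bmOuter]

-- the chase: from candidate c (all earlier elements strictly cmp-below a[c]), the outer
-- loop ends at an index r that is strictly cmp-above all earlier elements and
-- not cmp-below any later one
lemma chase_spec (a : List Int) (cmp : Int → Int → Bool)
    (htr : ∀ x y z, cmp x y = true → cmp y z = true → cmp x z = true)
    (htr2 : ∀ x y z, cmp x y = false → cmp x z = true → cmp y z = true) :
    ∀ (c : Nat), c < a.length →
      (∀ j, j < c → cmp (a.getD j 0) (a.getD c 0) = true) →
      ∃ r : Nat, r < a.length ∧
        (bmOuter a cmp (a.length : Int) (PySem.List.pyRange (c : Int) (a.length : Int) 1) ((c : Int), (c : Int))).1 = (r : Int) ∧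
        (∀ j, j < r → cmp (a.getD j 0) (a.getD r 0) = true) ∧
        (∀ j, r < j → j < a.length → cmp (a.getD r 0) (a.getD j 0) = false) := by
  have H : ∀ (fuel c : Nat), a.length - c ≤ fuel → c < a.length →
      (∀ j, j < c → cmp (a.getD j 0) (a.getD c 0) = true) →
      ∃ r : Nat, r < a.length ∧
        (bmOuter a cmp (a.length : Int) (PySem.List.pyRange (c : Int) (a.length : Int) 1) ((c : Int), (c : Int))).1 = (r : Int) ∧
        (∀ j, j < r → cmp (a.getD j 0) (a.getD r 0) = true) ∧
        (∀ j, r < j → j < a.length → cmp (a.getD r 0) (a.getD j 0) = false) := by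
    intro fuel
    induction fuel with
    | zero => intro c hf hc _; omega
    | succ f ih =>
      intro c hf hc hinv
      rw [PySem.List.pyRange_one_cons (by exact_mod_cast hc)]
      simp only [bmOuter, if_neg (lt_irrefl (c : Int))]
      have hcast : (c : Int) + 1 = ((c + 1 : Nat) : Int) := by push_cast; ring
      rw [hcast, bm_read]
      by_cases hex : ∃ j : Nat, (c < j ∧ j < a.length) ∧ cmp (a.getD c 0) (a.getD j 0) = true
      · -- the scan breaks at the least hit j; the chase continues from j
        obtain ⟨⟨hcj, hjl⟩, hcmp⟩ := Nat.find_spec hex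
        have hjmin : ∀ m, m < Nat.find hex → c < m → m < a.length →
            cmp (a.getD c 0) (a.getD m 0) = false := by
          intro m hm hcm hml
          have := Nat.find_min hex hm
          simp only [not_and] at this
          exact Bool.eq_false_iff.mpr (fun h => this ⟨hcm, hml⟩ h)
        rw [inner_found a cmp _ (c + 1) (c : Int) (Nat.find hex) (by omega) hjl hcmp
          (fun m hm hmj => hjmin m hmj (by omega) (by omega))]
        simp only
        rw [outer_skip a cmp (c + 1) (Nat.find hex) _ (by omega) (by omega)]
        refine ih (Nat.find hex) (by omega) hjl ?_
        intro m hm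
        rcases lt_trichotomy m c with h | h | h
        · exact htr _ _ _ (hinv m h) hcmp
        · subst h; exact hcmp
        · exact htr2 _ _ _ (hjmin m hm h (by omega)) hcmp
      · -- no hit after c: the loop finishes with position c
        push_neg at hex
        have hmiss : ∀ m, c + 1 ≤ m → m < a.length → cmp (a.getD c 0) (a.getD m 0) = false := by
          intro m hm hml
          exact Bool.eq_false_iff.mpr (hex m ⟨by omega, hml⟩)
        have hE2 : ∀ j, c < j → j < a.length → cmp (a.getD c 0) (a.getD j 0) = false :=
          fun j h1 h2 => hmiss j (by omega) h2
        rw [inner_none a cmp _ (c + 1) (c : Int) hmiss]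
        by_cases hcl : c + 1 < a.length
        · rw [if_pos hcl]
          simp only
          rw [outer_tail a cmp (c + 1) (c : Int) (by omega) (by omega)]
          exact ⟨c, hc, rfl, hinv, hE2⟩
        · rw [if_neg hcl]
          rw [PySem.List.pyRange_one_eq_nil (by push_cast; omega)]
          exact ⟨c, hc, rfl, hinv, hE2⟩
  intro c hc hinv
  exact H a.length c (by omega) hc hinv

-- B's side: index? at the first occurrence
lemma index_first (a : List Int) (r : Nat) (hr : r < a.length)
    (hne : ∀ j, j < r → a.getD j 0 ≠ a.getD r 0) :
    PySem.List.index? a (a.getD r 0) = some r := by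
  rw [PySem.List.index?_eq_some_iff]
  refine ⟨a.take r, a.drop (r + 1), ?_, ?_, ?_⟩
  · rw [List.getD_eq_getElem a 0 hr, List.getElem_cons_drop, List.take_append_drop]
  · rw [List.length_take]; omega
  · intro hmem
    obtain ⟨j, hjl, hje⟩ := List.mem_iff_getElem.mp hmem
    rw [List.length_take] at hjl
    have hjr : j < r := by omega
    apply hne j hjr
    rw [List.getD_eq_getElem a 0 (by omega), ← hje, List.getElem_take]

-- ===== VERDICT (by name: the statement is the Claim_ definition above) =====
-- common head: with the chase result r in hand, both branches reduce the same way
lemma alt_at (a : List Int) (r : Nat) (hr : r < a.length) (m : Int)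
    (hm : m ∈ a) (hub : ∀ y ∈ a, y ≤ a.getD r 0) (hlb : a.getD r 0 ≤ m)
    (hne : ∀ j, j < r → a.getD j 0 ≠ a.getD r 0) :
    ((PySem.List.index? a m).getD 0 : Int) = (r : Int) := by
  have hmr : m = a.getD r 0 := le_antisymm (hub m hm) hlb
  rw [hmr, index_first a r hr hne]
  simp

theorem bubble_max_spec : Claim_equal_bubble_max := by
  unfold Claim_equal_bubble_max
  intro lists switch _ hpre
  unfold Spec_bubble_max
  unfold Pre_bubble_max at hpre
  have hlen : 0 < lists.length := List.length_pos_iff.mpr hpre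
  cases switch with
  | false =>
    obtain ⟨r, hrl, heq, hE1, hE2⟩ :=
      chase_spec lists (fun x y => decide (x < y))
        (fun x y z h1 h2 => by simp only [decide_eq_true_eq] at *; omega)
        (fun x y z h1 h2 => by
          simp only [decide_eq_false_iff_not, decide_eq_true_eq] at *; omega)
        0 hlen (fun j hj => absurd hj (by omega))
    have hA : bubble_max lists false = (r : Int) := by
      unfold bubble_max
      simp only [Bool.false_eq_true, if_false]
      have h0 : (0 : Int) = ((0 : Nat) : Int) := rfl
      rw [h0]
      exact heq
    have hub : ∀ y ∈ lists, y ≤ lists.getD r 0 := by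
      intro y hy
      obtain ⟨j, hjl, rfl⟩ := List.mem_iff_getElem.mp hy
      rw [← List.getD_eq_getElem lists 0 hjl]
      rcases lt_trichotomy j r with h | h | h
      · have := hE1 j h; simp only [decide_eq_true_eq] at this; omega
      · subst h; exact le_rfl
      · have := hE2 j h hjl; simp only [decide_eq_false_iff_not] at this; omega
    cases hm : PySem.List.max? lists (fun v => v) with
    | none => exact absurd ((PySem.List.max?_eq_none_iff _ _).mp hm) hpre
    | some m =>
      have hlb : lists.getD r 0 ≤ m := by
        have := PySem.List.max?_isMax hm (lists.getD r 0)
          (by rw [List.getD_eq_getElem lists 0 hrl]; exact List.getElem_mem hrl)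
        exact this
      unfold bubble_max_alt
      simp only [Bool.false_eq_true, if_false]
      rw [hm, hA]
      exact (alt_at lists r hrl m (PySem.List.max?_mem hm) hub hlb
        (fun j hj => ne_of_lt (by have := hE1 j hj; simpa using this))).symm
  | true =>
    obtain ⟨r, hrl, heq, hE1, hE2⟩ :=
      chase_spec lists (fun x y => decide (x > y))
        (fun x y z h1 h2 => by simp only [decide_eq_true_eq] at *; omega)
        (fun x y z h1 h2 => by
          simp only [decide_eq_false_iff_not, decide_eq_true_eq] at *; omega)
        0 hlen (fun j hj => absurd hj (by omega))
    have hA : bubble_max lists true = (r : Int) := by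
      unfold bubble_max
      simp only [if_true]
      have h0 : (0 : Int) = ((0 : Nat) : Int) := rfl
      rw [h0]
      exact heq
    have hub : ∀ y ∈ lists, lists.getD r 0 ≤ y := by
      intro y hy
      obtain ⟨j, hjl, rfl⟩ := List.mem_iff_getElem.mp hy
      rw [← List.getD_eq_getElem lists 0 hjl]
      rcases lt_trichotomy j r with h | h | h
      · have := hE1 j h; simp only [decide_eq_true_eq] at this; omega
      · subst h; exact le_rfl
      · have := hE2 j h hjl; simp only [decide_eq_false_iff_not] at this; omega
    cases hm : PySem.List.min? lists (fun v => v) with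
    | none => exact absurd ((PySem.List.min?_eq_none_iff _ _).mp hm) hpre
    | some m =>
      have hmr : m = lists.getD r 0 := by
        refine le_antisymm ?_ (hub m (PySem.List.min?_mem hm))
        have := PySem.List.min?_isMin hm (lists.getD r 0)
          (by rw [List.getD_eq_getElem lists 0 hrl]; exact List.getElem_mem hrl)
        exact this
      unfold bubble_max_alt
      simp only [if_true]
      rw [hm, hA]
      have hidx : ((PySem.List.index? lists m).getD 0 : Int) = (r : Int) := by
        rw [hmr, index_first lists r hrl
          (fun j hj => (ne_of_gt (by have := hE1 j hj; simpa using this)))]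
        simp
      exact hidx.symm
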